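-- pv_equiv track=rewrite | github.com/shahiakhilesh1304/DSA | Solution/Question31/largestinGrid.py | productGrid
-- ===== SOURCE A (Python) =====
-- def productGrid(grid):
--     row = len(grid)
--     col = len(grid[0])
--     max__ = 0
--     for i in range(row):
--         for j in range(col):
--             #UP
--             if i-3 >= 0:
--                 prdt = grid[i][j]*grid[i-1][j]*grid[i-2][j]*grid[i-3][j]
--                 max__ = max(prdt,max__)
--             #down
--             if i+3 < row:
--                 prdt = grid[i][j]*grid[i+1][j]*grid[i+2][j]*grid[i+3][j]
--                 max__ = max(max__,prdt)
--             #right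
--             if j+3 < col:
--                 prdt = grid[i][j]*grid[i][j+1]*grid[i][j+2]*grid[i][j+3]
--                 max__ = max(max__,prdt)
--             #left
--             if j-3 >= 0:
--                 prdt = grid[i][j]*grid[i][j-1]*grid[i][j-2]*grid[i][j-3]
--                 max__ = max(max__,prdt)
--
--             #diagonal
--             #down right
--             if i+3 < row and j+3 < col:
--                 prdt = grid[i][j]*grid[i+1][j+1]*grid[i+2][j+2]*grid[i+3][j+3]
--                 max__ = max(prdt,max__)
--             #down left diagonal
--             if i+3 < row and j-3 >= 0:
--                 prdt = grid[i][j]*grid[i+1][j-1]*grid[i+2][j-2]*grid[i+3][j-3]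
--                 max__ = max(prdt,max__)
--             #Up Right
--             if j-3 >= 0 and i-3 >= 0:
--                 prdt = grid[i][j]*grid[i-1][j-1]*grid[i-2][j-2]*grid[i-3][j-3]
--                 max__ = max(prdt,max__)
--             #Up left
--             if j+3 < col and i-3 >= 0:
--                 prdt = grid[i][j]*grid[i-1][j+1]*grid[i-2][j+2]*grid[i-3][j+3]
--                 max__ = max(prdt,max__)
--     return max__
-- ===== SOURCE B (Python) =====
-- def productGrid(grid):
--     col = len(grid[0])
--     rows = [r[:col] for r in grid]
--     n = len(rows)
--     cols = [[r[j] for r in rows] for j in range(col)]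
--     diags = [[rows[i][i + d] for i in range(max(0, -d), min(n, col - d))]
--              for d in range(-(n - 1), col)]
--     adiags = [[rows[i][s - i] for i in range(max(0, s - col + 1), min(n, s + 1))]
--               for s in range(n + col - 1)]
--     best = 0
--     for line in rows + cols + diags + adiags:
--         for k in range(len(line) - 3):
--             p = line[k] * line[k + 1] * line[k + 2] * line[k + 3]
--             if p > best:
--                 best = p
--     return best
-- ===== Notes on version B (the rewrite author's own statement) =====
-- stated objective: alternative
-- what changed: B extracts every row, column, diagonal and anti-diagonal as a 1-D line and scans each line's 4-windows once with one window helper, instead of A's per-cell double loop that tests all 8 directions with boundary guards and visits every window twice.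
-- outside the precondition, e.g. on productGrid([[1, 2], [5]]): A returns 0, B raises IndexError
import Mathlib
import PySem

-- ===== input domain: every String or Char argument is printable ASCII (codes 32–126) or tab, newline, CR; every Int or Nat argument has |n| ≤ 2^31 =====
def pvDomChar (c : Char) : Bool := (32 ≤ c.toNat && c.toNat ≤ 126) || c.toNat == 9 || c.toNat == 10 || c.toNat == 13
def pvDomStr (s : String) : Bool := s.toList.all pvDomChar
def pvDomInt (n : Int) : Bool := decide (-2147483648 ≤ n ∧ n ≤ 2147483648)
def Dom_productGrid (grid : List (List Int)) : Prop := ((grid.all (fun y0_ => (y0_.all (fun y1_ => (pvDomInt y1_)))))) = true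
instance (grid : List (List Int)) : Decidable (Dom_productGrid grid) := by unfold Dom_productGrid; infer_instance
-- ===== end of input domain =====

-- B replaces A's per-cell scan over 8 guarded directions by extracting every row,
-- column, diagonal and anti-diagonal as a 1-D line and scanning each line's
-- 4-windows once (objective: alternative decomposition, same asymptotic cost).

-- ===== PORT A =====
def pvCell (grid : List (List Int)) (i j : Int) : Int :=
  PySem.List.pyGetD (PySem.List.pyGetD grid i []) j 0

def pvStep (grid : List (List Int)) (row col i j m : Int) : Int :=
  let m := if i - 3 ≥ 0 then
      max (pvCell grid i j * pvCell grid (i-1) j * pvCell grid (i-2) j * pvCell grid (i-3) j) m else m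
  let m := if i + 3 < row then
      max m (pvCell grid i j * pvCell grid (i+1) j * pvCell grid (i+2) j * pvCell grid (i+3) j) else m
  let m := if j + 3 < col then
      max m (pvCell grid i j * pvCell grid i (j+1) * pvCell grid i (j+2) * pvCell grid i (j+3)) else m
  let m := if j - 3 ≥ 0 then
      max m (pvCell grid i j * pvCell grid i (j-1) * pvCell grid i (j-2) * pvCell grid i (j-3)) else m
  let m := if i + 3 < row ∧ j + 3 < col then
      max (pvCell grid i j * pvCell grid (i+1) (j+1) * pvCell grid (i+2) (j+2) * pvCell grid (i+3) (j+3)) m else m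
  let m := if i + 3 < row ∧ j - 3 ≥ 0 then
      max (pvCell grid i j * pvCell grid (i+1) (j-1) * pvCell grid (i+2) (j-2) * pvCell grid (i+3) (j-3)) m else m
  let m := if j - 3 ≥ 0 ∧ i - 3 ≥ 0 then
      max (pvCell grid i j * pvCell grid (i-1) (j-1) * pvCell grid (i-2) (j-2) * pvCell grid (i-3) (j-3)) m else m
  let m := if j + 3 < col ∧ i - 3 ≥ 0 then
      max (pvCell grid i j * pvCell grid (i-1) (j+1) * pvCell grid (i-2) (j+2) * pvCell grid (i-3) (j+3)) m else m
  m

def productGrid (grid : List (List Int)) : Int :=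
  let row : Int := PySem.List.len grid
  let col : Int := PySem.List.len (PySem.List.pyGetD grid 0 [])
  (PySem.List.pyRange 0 row 1).foldl (fun m i =>
    (PySem.List.pyRange 0 col 1).foldl (fun m j => pvStep grid row col i j m) m) 0

-- ===== PORT B =====
def pvLineMax (line : List Int) (best : Int) : Int :=
  (PySem.List.pyRange 0 (PySem.List.len line - 3) 1).foldl (fun b k =>
    let p := PySem.List.pyGetD line k 0 * PySem.List.pyGetD line (k+1) 0 *
             PySem.List.pyGetD line (k+2) 0 * PySem.List.pyGetD line (k+3) 0
    if p > b then p else b) best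

def productGrid_alt (grid : List (List Int)) : Int :=
  let col : Int := PySem.List.len (PySem.List.pyGetD grid 0 [])
  let rows := grid.map (fun r => PySem.List.slice r none (some col))
  let n : Int := PySem.List.len rows
  let colLines := (PySem.List.pyRange 0 col 1).map (fun j =>
    rows.map (fun r => PySem.List.pyGetD r j 0))
  let diags := (PySem.List.pyRange (-(n-1)) col 1).map (fun d =>
    (PySem.List.pyRange (max 0 (-d)) (min n (col - d)) 1).map (fun i =>
      PySem.List.pyGetD (PySem.List.pyGetD rows i []) (i+d) 0))
  let adiags := (PySem.List.pyRange 0 (n + col - 1) 1).map (fun s =>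
    (PySem.List.pyRange (max 0 (s - col + 1)) (min n (s+1)) 1).map (fun i =>
      PySem.List.pyGetD (PySem.List.pyGetD rows i []) (s-i) 0))
  (rows ++ colLines ++ diags ++ adiags).foldl (fun best line => pvLineMax line best) 0

-- ===== PRECONDITION & SPEC =====
-- Pre_ excludes the empty grid (A raises IndexError on len(grid[0])) and ragged
-- grids with a row shorter than the first row: there A raises IndexError as soon
-- as any window exists, and when both dimensions are < 4 A accidentally returns 0
-- from cells it never touches while B's column extraction raises IndexError.
def Pre_productGrid (grid : List (List Int)) : Prop :=
  grid ≠ [] ∧ ∀ r ∈ grid, (grid.headD []).length ≤ r.length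
instance (grid : List (List Int)) : Decidable (Pre_productGrid grid) := by
  unfold Pre_productGrid; infer_instance

def pvWitness_productGrid : List (List Int) :=
  [[1, -2, 3, 4], [5, 6, -7, 8], [9, 1, 2, 3], [4, 5, 6, 7]]

def Spec_productGrid (grid : List (List Int)) (out : Int) : Prop := out = productGrid_alt grid
instance (grid : List (List Int)) (out : Int) : Decidable (Spec_productGrid grid out) := by
  unfold Spec_productGrid; infer_instance

-- ===== CLAIM (what is proved, stated in full; the proofs are below) =====
def Claim_equal_productGrid : Prop :=
  ∀ (grid : List (List Int)), Dom_productGrid grid → Pre_productGrid grid →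
    Spec_productGrid grid (productGrid grid)

-- ===== LEMMAS AND PROOFS =====

-- proof-side abbreviations
def pvRowI (grid : List (List Int)) : Int := (grid.length : Int)
def pvColI (grid : List (List Int)) : Int := ((grid.headD []).length : Int)

def pvRows (grid : List (List Int)) : List (List Int) :=
  grid.map (fun r => PySem.List.slice r none (some (pvColI grid)))

-- A's per-cell candidate list (the 8 guarded products at cell (i, j))
def candsA (grid : List (List Int)) (row col i j : Int) : List Int :=
  (if i - 3 ≥ 0 then
      [pvCell grid i j * pvCell grid (i-1) j * pvCell grid (i-2) j * pvCell grid (i-3) j] else []) ++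
  (if i + 3 < row then
      [pvCell grid i j * pvCell grid (i+1) j * pvCell grid (i+2) j * pvCell grid (i+3) j] else []) ++
  (if j + 3 < col then
      [pvCell grid i j * pvCell grid i (j+1) * pvCell grid i (j+2) * pvCell grid i (j+3)] else []) ++
  (if j - 3 ≥ 0 then
      [pvCell grid i j * pvCell grid i (j-1) * pvCell grid i (j-2) * pvCell grid i (j-3)] else []) ++
  (if i + 3 < row ∧ j + 3 < col then
      [pvCell grid i j * pvCell grid (i+1) (j+1) * pvCell grid (i+2) (j+2) * pvCell grid (i+3) (j+3)] else []) ++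
  (if i + 3 < row ∧ j - 3 ≥ 0 then
      [pvCell grid i j * pvCell grid (i+1) (j-1) * pvCell grid (i+2) (j-2) * pvCell grid (i+3) (j-3)] else []) ++
  (if j - 3 ≥ 0 ∧ i - 3 ≥ 0 then
      [pvCell grid i j * pvCell grid (i-1) (j-1) * pvCell grid (i-2) (j-2) * pvCell grid (i-3) (j-3)] else []) ++
  (if j + 3 < col ∧ i - 3 ≥ 0 then
      [pvCell grid i j * pvCell grid (i-1) (j+1) * pvCell grid (i-2) (j+2) * pvCell grid (i-3) (j+3)] else [])

def pvLA (grid : List (List Int)) : List Int :=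
  (PySem.List.pyRange 0 (pvRowI grid) 1).flatMap (fun i =>
    (PySem.List.pyRange 0 (pvColI grid) 1).flatMap (fun j =>
      candsA grid (pvRowI grid) (pvColI grid) i j))

-- B's window-product list of one line
def pvProds (line : List Int) : List Int :=
  (PySem.List.pyRange 0 ((line.length : Int) - 3) 1).map (fun k =>
    PySem.List.pyGetD line k 0 * PySem.List.pyGetD line (k+1) 0 *
    PySem.List.pyGetD line (k+2) 0 * PySem.List.pyGetD line (k+3) 0)

def pvLines (grid : List (List Int)) : List (List Int) :=
  pvRows grid ++
  (PySem.List.pyRange 0 (pvColI grid) 1).map (fun j =>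
    (pvRows grid).map (fun r => PySem.List.pyGetD r j 0)) ++
  (PySem.List.pyRange (-((grid.length : Int) - 1)) (pvColI grid) 1).map (fun d =>
    (PySem.List.pyRange (max 0 (-d)) (min (grid.length : Int) (pvColI grid - d)) 1).map (fun i =>
      PySem.List.pyGetD (PySem.List.pyGetD (pvRows grid) i []) (i+d) 0)) ++
  (PySem.List.pyRange 0 ((grid.length : Int) + pvColI grid - 1) 1).map (fun s =>
    (PySem.List.pyRange (max 0 (s - pvColI grid + 1)) (min (grid.length : Int) (s+1)) 1).map (fun i =>
      PySem.List.pyGetD (PySem.List.pyGetD (pvRows grid) i []) (s-i) 0))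

def pvLB (grid : List (List Int)) : List Int := (pvLines grid).flatMap pvProds

-- the common value description: x is the product of 4 consecutive cells in one of
-- the four forward directions (right, down, down-right, down-left)
def pvGood (grid : List (List Int)) (x : Int) : Prop :=
  ∃ i j : Int, 0 ≤ i ∧ 0 ≤ j ∧
    ((i < pvRowI grid ∧ j + 3 < pvColI grid ∧
        x = pvCell grid i j * pvCell grid i (j+1) * pvCell grid i (j+2) * pvCell grid i (j+3)) ∨
     (i + 3 < pvRowI grid ∧ j < pvColI grid ∧
        x = pvCell grid i j * pvCell grid (i+1) j * pvCell grid (i+2) j * pvCell grid (i+3) j) ∨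
     (i + 3 < pvRowI grid ∧ j + 3 < pvColI grid ∧
        x = pvCell grid i j * pvCell grid (i+1) (j+1) * pvCell grid (i+2) (j+2) * pvCell grid (i+3) (j+3)) ∨
     (i + 3 < pvRowI grid ∧ 3 ≤ j ∧ j < pvColI grid ∧
        x = pvCell grid i j * pvCell grid (i+1) (j-1) * pvCell grid (i+2) (j-2) * pvCell grid (i+3) (j-3)))

-- generic max-fold lemmas
theorem pvFoldlMax_eq_of_mem_iff (L M : List Int) (h : ∀ x, x ∈ L ↔ x ∈ M) (a : Int) :
    L.foldl max a = M.foldl max a := by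
  have key : ∀ (P Q : List Int), (∀ x, x ∈ P → x ∈ Q) → P.foldl max a ≤ Q.foldl max a := by
    intro P Q hs
    rcases PySem.List.foldl_max_mem P a with he | he
    · rw [he]; exact (PySem.List.le_foldl_max Q a).1
    · exact (PySem.List.le_foldl_max Q a).2 _ (hs _ he)
  exact le_antisymm (key L M fun x => (h x).mp) (key M L fun x => (h x).mpr)

theorem pvFoldl_foldlMax {α : Type} (f : α → List Int) (L : List α) (m : Int) :
    L.foldl (fun m x => (f x).foldl max m) m = (L.flatMap f).foldl max m := by
  induction L generalizing m with
  | nil => rfl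
  | cons y t ih => simp [List.flatMap_cons, List.foldl_append, ih]

theorem pvFoldlMax_map {α : Type} (g : α → Int) (L : List α) (m : Int) :
    L.foldl (fun b k => max b (g k)) m = (L.map g).foldl max m := by
  induction L generalizing m with
  | nil => rfl
  | cons y t ih => simp [List.foldl, ih]

theorem pvIfGt (p b : Int) : (if p > b then p else b) = max b p := by
  split <;> omega

theorem pvIteFold (h : Prop) [Decidable h] (p x : Int) :
    (if h then [p] else []).foldl max x = if h then max x p else x := by
  split <;> simp [List.foldl]

-- A's result is the max fold of its candidate list
theorem pvStep_eq (grid : List (List Int)) (row col i j m : Int) :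
    pvStep grid row col i j m = (candsA grid row col i j).foldl max m := by
  simp only [candsA, List.foldl_append, pvIteFold, pvStep]
  simp only [max_comm]

theorem pvGetD_zero_headD (l : List (List Int)) : PySem.List.pyGetD l 0 [] = l.headD [] := by
  rw [PySem.List.pyGetD_zero]; cases l <;> rfl

theorem pvA_eq (grid : List (List Int)) :
    productGrid grid = (pvLA grid).foldl max 0 := by
  unfold productGrid pvLA pvRowI pvColI
  simp only [PySem.List.len_eq, pvGetD_zero_headD, pvStep_eq, pvFoldl_foldlMax]

theorem pvLineMax_eq (line : List Int) (best : Int) :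
    pvLineMax line best = (pvProds line).foldl max best := by
  unfold pvLineMax pvProds
  simp only [PySem.List.len_eq, pvIfGt, pvFoldlMax_map]

-- B's result is the max fold of its window-product list
theorem pvB_eq (grid : List (List Int)) :
    productGrid_alt grid = (pvLB grid).foldl max 0 := by
  unfold productGrid_alt pvLB pvLines pvRows pvColI
  simp only [PySem.List.len_eq, List.length_map, pvGetD_zero_headD, pvLineMax_eq,
    pvFoldl_foldlMax]

-- membership in A's candidate list
theorem pvMem_candsA (grid : List (List Int)) (row col i j x : Int) :
    x ∈ candsA grid row col i j ↔
      ((i - 3 ≥ 0 ∧ x = pvCell grid i j * pvCell grid (i-1) j * pvCell grid (i-2) j * pvCell grid (i-3) j) ∨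
       (i + 3 < row ∧ x = pvCell grid i j * pvCell grid (i+1) j * pvCell grid (i+2) j * pvCell grid (i+3) j) ∨
       (j + 3 < col ∧ x = pvCell grid i j * pvCell grid i (j+1) * pvCell grid i (j+2) * pvCell grid i (j+3)) ∨
       (j - 3 ≥ 0 ∧ x = pvCell grid i j * pvCell grid i (j-1) * pvCell grid i (j-2) * pvCell grid i (j-3)) ∨
       ((i + 3 < row ∧ j + 3 < col) ∧ x = pvCell grid i j * pvCell grid (i+1) (j+1) * pvCell grid (i+2) (j+2) * pvCell grid (i+3) (j+3)) ∨
       ((i + 3 < row ∧ j - 3 ≥ 0) ∧ x = pvCell grid i j * pvCell grid (i+1) (j-1) * pvCell grid (i+2) (j-2) * pvCell grid (i+3) (j-3)) ∨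
       ((j - 3 ≥ 0 ∧ i - 3 ≥ 0) ∧ x = pvCell grid i j * pvCell grid (i-1) (j-1) * pvCell grid (i-2) (j-2) * pvCell grid (i-3) (j-3)) ∨
       ((j + 3 < col ∧ i - 3 ≥ 0) ∧ x = pvCell grid i j * pvCell grid (i-1) (j+1) * pvCell grid (i-2) (j+2) * pvCell grid (i-3) (j+3))) := by
  simp [candsA, List.mem_append, List.mem_ite_nil_right]

-- A's candidates are exactly the 4-in-a-row products (each taken from either end)
theorem pvMemLA (grid : List (List Int)) (x : Int) :
    x ∈ pvLA grid ↔ pvGood grid x := by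
  unfold pvLA pvGood
  simp only [List.mem_flatMap, PySem.List.mem_pyRange_one, pvMem_candsA]
  constructor
  · rintro ⟨i, ⟨hi0, hir⟩, j, ⟨hj0, hjc⟩, hc⟩
    rcases hc with ⟨hg, hx⟩ | ⟨hg, hx⟩ | ⟨hg, hx⟩ | ⟨hg, hx⟩ | ⟨⟨hg1, hg2⟩, hx⟩ | ⟨⟨hg1, hg2⟩, hx⟩ | ⟨⟨hg1, hg2⟩, hx⟩ | ⟨⟨hg1, hg2⟩, hx⟩
    · exact ⟨i - 3, j, by omega, by omega, Or.inr (Or.inl ⟨by omega, by omega, by rw [hx]; ring_nf⟩)⟩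
    · exact ⟨i, j, by omega, by omega, Or.inr (Or.inl ⟨by omega, by omega, hx⟩)⟩
    · exact ⟨i, j, by omega, by omega, Or.inl ⟨by omega, by omega, hx⟩⟩
    · exact ⟨i, j - 3, by omega, by omega, Or.inl ⟨by omega, by omega, by rw [hx]; ring_nf⟩⟩
    · exact ⟨i, j, by omega, by omega, Or.inr (Or.inr (Or.inl ⟨by omega, by omega, hx⟩))⟩
    · exact ⟨i, j, by omega, by omega, Or.inr (Or.inr (Or.inr ⟨by omega, by omega, by omega, hx⟩))⟩
    · exact ⟨i - 3, j - 3, by omega, by omega, Or.inr (Or.inr (Or.inl ⟨by omega, by omega, by rw [hx]; ring_nf⟩))⟩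
    · exact ⟨i - 3, j + 3, by omega, by omega, Or.inr (Or.inr (Or.inr ⟨by omega, by omega, by omega, by rw [hx]; ring_nf⟩))⟩
  · rintro ⟨i, j, hi0, hj0, hc⟩
    rcases hc with ⟨h1, h2, hx⟩ | ⟨h1, h2, hx⟩ | ⟨h1, h2, hx⟩ | ⟨h1, h2, h3, hx⟩
    · exact ⟨i, ⟨hi0, h1⟩, j, ⟨hj0, by omega⟩, Or.inr (Or.inr (Or.inl ⟨h2, hx⟩))⟩
    · exact ⟨i, ⟨hi0, by omega⟩, j, ⟨hj0, h2⟩, Or.inr (Or.inl ⟨h1, hx⟩)⟩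
    · exact ⟨i, ⟨hi0, by omega⟩, j, ⟨hj0, by omega⟩, Or.inr (Or.inr (Or.inr (Or.inr (Or.inl ⟨⟨h1, h2⟩, hx⟩))))⟩
    · exact ⟨i, ⟨hi0, by omega⟩, j, ⟨hj0, h3⟩, Or.inr (Or.inr (Or.inr (Or.inr (Or.inr (Or.inl ⟨⟨h1, by omega⟩, hx⟩)))))⟩

theorem pvGetD_map_pyRange_int (f : Int → Int) (a b k : Int) (h0 : 0 ≤ k) (h : k < b - a) :
    PySem.List.pyGetD ((PySem.List.pyRange a b 1).map f) k 0 = f (a + k) := by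
  have hk : k = ((k.toNat : Nat) : Int) := by omega
  rw [hk, PySem.List.pyGetD_map_pyRange_one f a b k.toNat 0 (by omega)]

theorem pvMem_prods_map (a b : Int) (f : Int → Int) (x : Int) :
    x ∈ pvProds ((PySem.List.pyRange a b 1).map f) ↔
      ∃ k : Int, a ≤ k ∧ k + 3 < b ∧ x = f k * f (k+1) * f (k+2) * f (k+3) := by
  unfold pvProds
  simp only [List.length_map, PySem.List.length_pyRange_one, List.mem_map,
    PySem.List.mem_pyRange_one]
  constructor
  · rintro ⟨k, ⟨hk0, hkb⟩, rfl⟩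
    refine ⟨a + k, by omega, by omega, ?_⟩
    rw [pvGetD_map_pyRange_int f a b k hk0 (by omega),
        pvGetD_map_pyRange_int f a b (k+1) (by omega) (by omega),
        pvGetD_map_pyRange_int f a b (k+2) (by omega) (by omega),
        pvGetD_map_pyRange_int f a b (k+3) (by omega) (by omega)]
    ring_nf
  · rintro ⟨k, hak, hk3, rfl⟩
    refine ⟨k - a, ⟨by omega, by omega⟩, ?_⟩
    rw [pvGetD_map_pyRange_int f a b (k-a) (by omega) (by omega),
        pvGetD_map_pyRange_int f a b (k-a+1) (by omega) (by omega),
        pvGetD_map_pyRange_int f a b (k-a+2) (by omega) (by omega),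
        pvGetD_map_pyRange_int f a b (k-a+3) (by omega) (by omega)]
    ring_nf

theorem pvGetD_nil (j : Int) : PySem.List.pyGetD ([] : List Int) j 0 = 0 := by
  apply PySem.List.pyGetD_of_none
  rw [PySem.List.pyGet?_eq_none_iff]
  intro h
  simp [PySem.Raise.InRange] at h
  omega

-- a cell of the truncated row matrix is the corresponding grid cell
theorem pvCellRows (grid : List (List Int)) (hp : Pre_productGrid grid) (i j : Int)
    (h0 : 0 ≤ i) (hj0 : 0 ≤ j) (hjC : j < pvColI grid) :
    PySem.List.pyGetD (PySem.List.pyGetD (pvRows grid) i []) j 0 = pvCell grid i j := by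
  unfold pvCell
  by_cases hi : i < (grid.length : Int)
  · have hiN : i = ((i.toNat : Nat) : Int) := by omega
    have hlt : i.toNat < grid.length := by omega
    rw [hiN, PySem.List.pyGetD_natCast, PySem.List.pyGetD_natCast]
    have hrl : (pvRows grid).getD i.toNat [] = List.take (grid.headD []).length grid[i.toNat] := by
      rw [List.getD_eq_getElem _ _ (by simpa [pvRows] using hlt)]
      simp [pvRows, pvColI, PySem.List.slice_to_natCast]
    rw [hrl, List.getD_eq_getElem _ _ hlt]
    have hC : (grid.headD []).length ≤ grid[i.toNat].length :=
      hp.2 _ (List.getElem_mem hlt)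
    have hjN : j = ((j.toNat : Nat) : Int) := by omega
    have hjlt : j.toNat < (grid.headD []).length := by
      have := hjC; unfold pvColI at this; omega
    rw [hjN, PySem.List.pyGetD_natCast, PySem.List.pyGetD_natCast]
    have hjlt2 : j.toNat < (List.take (grid.headD []).length grid[i.toNat]).length := by
      rw [List.length_take]; omega
    rw [List.getD_eq_getElem _ _ hjlt2, List.getD_eq_getElem _ _ (by omega)]
    exact List.getElem_take
  · have h1 : PySem.List.pyGetD (pvRows grid) i [] = [] := by
      apply PySem.List.pyGetD_of_none
      rw [PySem.List.pyGet?_eq_none_iff]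
      intro h
      simp [PySem.Raise.InRange, pvRows] at h
      omega
    have h2 : PySem.List.pyGetD grid i [] = [] := by
      apply PySem.List.pyGetD_of_none
      rw [PySem.List.pyGet?_eq_none_iff]
      intro h
      simp [PySem.Raise.InRange] at h
      omega
    rw [h1, h2, pvGetD_nil]

-- a truncated row as a map over the column range
theorem pvRowLine (grid : List (List Int)) (hp : Pre_productGrid grid) (i : Nat) (hi : i < grid.length) :
    PySem.List.slice grid[i] none (some (pvColI grid)) =
      (PySem.List.pyRange 0 (pvColI grid) 1).map (fun j => pvCell grid (i : Int) j) := by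
  have hC : (grid.headD []).length ≤ grid[i].length := hp.2 _ (List.getElem_mem hi)
  unfold pvColI
  rw [PySem.List.slice_to_natCast]
  apply List.ext_getElem
  · rw [List.length_take, List.length_map, PySem.List.length_pyRange_one]; omega
  · intro k h1 h2
    rw [List.length_take] at h1
    have hk : k < (grid.headD []).length := by omega
    rw [List.getElem_take, List.getElem_map, PySem.List.getElem_pyRange_one]
    unfold pvCell
    rw [show ((0:Int) + (k:Int)) = ((k:Nat):Int) by omega, PySem.List.pyGetD_natCast,
        PySem.List.pyGetD_natCast, List.getD_eq_getElem _ _ hi,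
        List.getD_eq_getElem _ _ (by omega)]

-- a column as a map over the row range
theorem pvColLine (grid : List (List Int)) (hp : Pre_productGrid grid) (j : Int)
    (hj0 : 0 ≤ j) (hjC : j < pvColI grid) :
    (pvRows grid).map (fun r => PySem.List.pyGetD r j 0) =
      (PySem.List.pyRange 0 ((grid.length : Int)) 1).map (fun i => pvCell grid i j) := by
  apply List.ext_getElem
  · simp only [pvRows, List.length_map, PySem.List.length_pyRange_one]; omega
  · intro k h1 h2
    have hkR : k < grid.length := by simpa only [List.length_map, pvRows] using h1
    rw [List.getElem_map, List.getElem_map, PySem.List.getElem_pyRange_one]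
    have hkP : k < (pvRows grid).length := by simpa only [pvRows, List.length_map] using hkR
    have h3 : (pvRows grid)[k]'hkP = PySem.List.pyGetD (pvRows grid) ((k:Nat):Int) [] := by
      rw [PySem.List.pyGetD_natCast, List.getD_eq_getElem _ _ hkP]
    rw [h3, pvCellRows grid hp _ j (by omega) hj0 hjC,
        show ((0:Int) + (k:Int)) = ((k:Nat):Int) by omega]

-- the four line families, window by window
theorem pvPart1 (grid : List (List Int)) (hp : Pre_productGrid grid) (x : Int) :
    (∃ line ∈ pvRows grid, x ∈ pvProds line) ↔
      (∃ i j : Int, 0 ≤ i ∧ 0 ≤ j ∧ i < pvRowI grid ∧ j + 3 < pvColI grid ∧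
        x = pvCell grid i j * pvCell grid i (j+1) * pvCell grid i (j+2) * pvCell grid i (j+3)) := by
  constructor
  · rintro ⟨line, hline, hx⟩
    rw [pvRows, List.mem_map] at hline
    obtain ⟨r, hr, rfl⟩ := hline
    obtain ⟨iN, hiN, rfl⟩ := List.mem_iff_getElem.mp hr
    rw [pvRowLine grid hp iN hiN, pvMem_prods_map] at hx
    obtain ⟨k, hk0, hk3, rfl⟩ := hx
    exact ⟨iN, k, by omega, hk0, by unfold pvRowI; omega, hk3, rfl⟩
  · rintro ⟨i, j, hi0, hj0, hiR, hj3, rfl⟩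
    have hiN : i.toNat < grid.length := by unfold pvRowI at hiR; omega
    refine ⟨PySem.List.slice (grid[i.toNat]'hiN) none (some (pvColI grid)), ?_, ?_⟩
    · rw [pvRows]; exact List.mem_map_of_mem (List.getElem_mem hiN)
    · rw [pvRowLine grid hp _ hiN, pvMem_prods_map]
      exact ⟨j, hj0, hj3, by rw [show ((i.toNat : Nat) : Int) = i from by omega]⟩

theorem pvPart2 (grid : List (List Int)) (hp : Pre_productGrid grid) (x : Int) :
    (∃ j : Int, (0 ≤ j ∧ j < pvColI grid) ∧
        x ∈ pvProds ((pvRows grid).map (fun r => PySem.List.pyGetD r j 0))) ↔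
      (∃ i j : Int, 0 ≤ i ∧ 0 ≤ j ∧ i + 3 < pvRowI grid ∧ j < pvColI grid ∧
        x = pvCell grid i j * pvCell grid (i+1) j * pvCell grid (i+2) j * pvCell grid (i+3) j) := by
  constructor
  · rintro ⟨j, ⟨hj0, hjC⟩, hx⟩
    rw [pvColLine grid hp j hj0 hjC, pvMem_prods_map] at hx
    obtain ⟨k, hk0, hk3, rfl⟩ := hx
    exact ⟨k, j, hk0, hj0, by unfold pvRowI; omega, hjC, rfl⟩
  · rintro ⟨i, j, hi0, hj0, hiR, hjC, rfl⟩
    refine ⟨j, ⟨hj0, hjC⟩, ?_⟩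
    rw [pvColLine grid hp j hj0 hjC, pvMem_prods_map]
    exact ⟨i, hi0, by unfold pvRowI at hiR; omega, rfl⟩

theorem pvDiagLine (grid : List (List Int)) (hp : Pre_productGrid grid) (d : Int) :
    (PySem.List.pyRange (max 0 (-d)) (min (grid.length : Int) (pvColI grid - d)) 1).map (fun i =>
        PySem.List.pyGetD (PySem.List.pyGetD (pvRows grid) i []) (i+d) 0) =
    (PySem.List.pyRange (max 0 (-d)) (min (grid.length : Int) (pvColI grid - d)) 1).map (fun i =>
        pvCell grid i (i+d)) := by
  apply List.map_congr_left
  intro i hi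
  rw [PySem.List.mem_pyRange_one] at hi
  exact pvCellRows grid hp i (i+d) (by omega) (by omega) (by omega)

theorem pvPart3 (grid : List (List Int)) (hp : Pre_productGrid grid) (x : Int) :
    (∃ d : Int, (-(((grid.length : Int)) - 1) ≤ d ∧ d < pvColI grid) ∧
        x ∈ pvProds ((PySem.List.pyRange (max 0 (-d)) (min (grid.length : Int) (pvColI grid - d)) 1).map (fun i =>
          PySem.List.pyGetD (PySem.List.pyGetD (pvRows grid) i []) (i+d) 0))) ↔
      (∃ i j : Int, 0 ≤ i ∧ 0 ≤ j ∧ i + 3 < pvRowI grid ∧ j + 3 < pvColI grid ∧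
        x = pvCell grid i j * pvCell grid (i+1) (j+1) * pvCell grid (i+2) (j+2) * pvCell grid (i+3) (j+3)) := by
  constructor
  · rintro ⟨d, ⟨hd1, hd2⟩, hx⟩
    rw [pvDiagLine grid hp d, pvMem_prods_map] at hx
    obtain ⟨k, hk1, hk3, rfl⟩ := hx
    refine ⟨k, k + d, by omega, by omega, by unfold pvRowI; omega, by omega, ?_⟩
    ring_nf
  · rintro ⟨i, j, hi0, hj0, hiR, hjC, rfl⟩
    unfold pvRowI at hiR
    refine ⟨j - i, ⟨by omega, by omega⟩, ?_⟩
    rw [pvDiagLine grid hp (j - i), pvMem_prods_map]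
    refine ⟨i, by omega, by omega, ?_⟩
    ring_nf

theorem pvAdiagLine (grid : List (List Int)) (hp : Pre_productGrid grid) (s : Int) :
    (PySem.List.pyRange (max 0 (s - pvColI grid + 1)) (min (grid.length : Int) (s+1)) 1).map (fun i =>
        PySem.List.pyGetD (PySem.List.pyGetD (pvRows grid) i []) (s-i) 0) =
    (PySem.List.pyRange (max 0 (s - pvColI grid + 1)) (min (grid.length : Int) (s+1)) 1).map (fun i =>
        pvCell grid i (s-i)) := by
  apply List.map_congr_left
  intro i hi
  rw [PySem.List.mem_pyRange_one] at hi
  exact pvCellRows grid hp i (s-i) (by omega) (by omega) (by omega)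

theorem pvPart4 (grid : List (List Int)) (hp : Pre_productGrid grid) (x : Int) :
    (∃ s : Int, (0 ≤ s ∧ s < (grid.length : Int) + pvColI grid - 1) ∧
        x ∈ pvProds ((PySem.List.pyRange (max 0 (s - pvColI grid + 1)) (min (grid.length : Int) (s+1)) 1).map (fun i =>
          PySem.List.pyGetD (PySem.List.pyGetD (pvRows grid) i []) (s-i) 0))) ↔
      (∃ i j : Int, 0 ≤ i ∧ 0 ≤ j ∧ i + 3 < pvRowI grid ∧ 3 ≤ j ∧ j < pvColI grid ∧
        x = pvCell grid i j * pvCell grid (i+1) (j-1) * pvCell grid (i+2) (j-2) * pvCell grid (i+3) (j-3)) := by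
  constructor
  · rintro ⟨s, ⟨hs0, hs1⟩, hx⟩
    rw [pvAdiagLine grid hp s, pvMem_prods_map] at hx
    obtain ⟨k, hk1, hk3, rfl⟩ := hx
    refine ⟨k, s - k, by omega, by omega, by unfold pvRowI; omega, by omega, by omega, ?_⟩
    ring_nf
  · rintro ⟨i, j, hi0, hj0, hiR, hj3, hjC, rfl⟩
    unfold pvRowI at hiR
    refine ⟨i + j, ⟨by omega, by omega⟩, ?_⟩
    rw [pvAdiagLine grid hp (i + j), pvMem_prods_map]
    refine ⟨i, by omega, by omega, ?_⟩
    ring_nf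

-- B's window products are exactly the 4-in-a-row products
theorem pvMemLB (grid : List (List Int)) (hp : Pre_productGrid grid) (x : Int) :
    x ∈ pvLB grid ↔ pvGood grid x := by
  unfold pvLB pvLines
  simp only [List.mem_flatMap, List.mem_append, List.mem_map, PySem.List.mem_pyRange_one]
  constructor
  · rintro ⟨line, (((hmem | ⟨j, hj, rfl⟩) | ⟨d, hd, rfl⟩) | ⟨s, hs, rfl⟩), hx⟩
    · obtain ⟨i, j, h1, h2, h3, h4, h5⟩ := (pvPart1 grid hp x).mp ⟨line, hmem, hx⟩
      exact ⟨i, j, h1, h2, Or.inl ⟨h3, h4, h5⟩⟩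
    · obtain ⟨i, j', h1, h2, h3, h4, h5⟩ := (pvPart2 grid hp x).mp ⟨j, hj, hx⟩
      exact ⟨i, j', h1, h2, Or.inr (Or.inl ⟨h3, h4, h5⟩)⟩
    · obtain ⟨i, j, h1, h2, h3, h4, h5⟩ := (pvPart3 grid hp x).mp ⟨d, hd, hx⟩
      exact ⟨i, j, h1, h2, Or.inr (Or.inr (Or.inl ⟨h3, h4, h5⟩))⟩
    · obtain ⟨i, j, h1, h2, h3, h4, h5, h6⟩ := (pvPart4 grid hp x).mp ⟨s, hs, hx⟩
      exact ⟨i, j, h1, h2, Or.inr (Or.inr (Or.inr ⟨h3, h4, h5, h6⟩))⟩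
  · rintro ⟨i, j, hi0, hj0, hc⟩
    rcases hc with ⟨h1, h2, hx⟩ | ⟨h1, h2, hx⟩ | ⟨h1, h2, hx⟩ | ⟨h1, h2, h3, hx⟩
    · obtain ⟨line, hmem, hx'⟩ := (pvPart1 grid hp x).mpr ⟨i, j, hi0, hj0, h1, h2, hx⟩
      exact ⟨line, Or.inl (Or.inl (Or.inl hmem)), hx'⟩
    · obtain ⟨j', hj', hx'⟩ := (pvPart2 grid hp x).mpr ⟨i, j, hi0, hj0, h1, h2, hx⟩
      exact ⟨_, Or.inl (Or.inl (Or.inr ⟨j', hj', rfl⟩)), hx'⟩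
    · obtain ⟨d, hd, hx'⟩ := (pvPart3 grid hp x).mpr ⟨i, j, hi0, hj0, h1, h2, hx⟩
      exact ⟨_, Or.inl (Or.inr ⟨d, hd, rfl⟩), hx'⟩
    · obtain ⟨s, hs, hx'⟩ := (pvPart4 grid hp x).mpr ⟨i, j, hi0, hj0, h1, h2, h3, hx⟩
      exact ⟨_, Or.inr ⟨s, hs, rfl⟩, hx'⟩

-- ===== VERDICT (by name: the statement is the Claim_ definition above) =====
theorem productGrid_spec : Claim_equal_productGrid := by
  intro grid _ hp
  unfold Spec_productGrid
  rw [pvA_eq, pvB_eq]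
  exact pvFoldlMax_eq_of_mem_iff _ _
    (fun x => (pvMemLA grid x).trans (pvMemLB grid hp x).symm) 0
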